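-- pv_equiv track=rewrite | github.com/winvu88888888-maker/tinnam888888 | test_column_analysis.py | method_conditional
-- ===== SOURCE A (Python) =====
-- from collections import Counter, defaultdict
--
-- def method_transition(history, pos):
--     """Transition matrix: P(next_pos=x | last_pos=y)."""
--     trans = defaultdict(Counter)
--     for i in range(len(history) - 1):
--         trans[history[i][pos]][history[i+1][pos]] += 1
--     last_val = history[-1][pos]
--     if last_val in trans and trans[last_val]:
--         return trans[last_val].most_common(1)[0][0]
--     return last_val
--
-- def method_conditional(history, pos):
--     """Conditional on previous position's value."""
--     if pos == 0:
--         return method_transition(history, pos)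
--     # P(pos_value | prev_pos_value in same draw)
--     trans = defaultdict(Counter)
--     for h in history:
--         trans[h[pos-1]][h[pos]] += 1
--     last_prev = history[-1][pos-1]
--     if last_prev in trans and trans[last_prev]:
--         return trans[last_prev].most_common(1)[0][0]
--     return history[-1][pos]
-- ===== SOURCE B (Python) =====
-- def method_conditional(history, pos):
--     """Conditional on previous position's value.
--
--     No hash tables at all: build the filtered list of candidate values, then
--     pick the winner by a direct argmax scan using list.count (first value with
--     a strictly greater count wins, which reproduces Counter's tie-breaking)."""
--     if pos == 0:
--         key = history[-1][0]
--         vals = [history[i + 1][0] for i in range(len(history) - 1)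
--                 if history[i][0] == key]
--     else:
--         key = history[-1][pos - 1]
--         vals = [h[pos] for h in history if h[pos - 1] == key]
--     best, best_c = history[-1][pos], 0
--     for v in vals:
--         c = vals.count(v)
--         if c > best_c:
--             best, best_c = v, c
--     return best
-- ===== Notes on version B (the rewrite author's own statement) =====
-- stated objective: alternative
-- what changed: A builds a dict-of-Counters transition table and looks up the last row's key; B uses no hash structure at all: it collects the filtered candidate list and picks the answer by a direct argmax scan with list.count (first strictly-greater count wins, matching Counter.most_common's first-occurrence tie-break).
import Mathlib
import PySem

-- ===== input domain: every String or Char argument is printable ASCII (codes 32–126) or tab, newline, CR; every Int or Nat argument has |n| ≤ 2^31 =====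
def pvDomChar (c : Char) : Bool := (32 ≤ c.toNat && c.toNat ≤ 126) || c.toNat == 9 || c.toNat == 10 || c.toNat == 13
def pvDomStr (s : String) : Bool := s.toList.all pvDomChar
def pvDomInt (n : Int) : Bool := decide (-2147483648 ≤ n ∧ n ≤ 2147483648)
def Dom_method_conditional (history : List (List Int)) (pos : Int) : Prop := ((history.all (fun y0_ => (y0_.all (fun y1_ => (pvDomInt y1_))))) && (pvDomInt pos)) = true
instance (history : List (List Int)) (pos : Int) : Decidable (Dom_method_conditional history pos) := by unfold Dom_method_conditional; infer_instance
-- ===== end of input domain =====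

-- B drops A's dict-of-Counters transition table: it collects the filtered candidate list
-- and picks the winner by a direct argmax scan with list.count (objective: alternative).

-- Counter.most_common(1)[0][0]: first key of maximal count in insertion order
-- (CPython's nlargest(1) is max with key, which returns the first extremal item).
-- 0 is returned only on an empty counter, where Python raises IndexError (guarded in A).
def mostCommon1 (d : PySem.Dict Int Int) : Int :=
  match PySem.List.max? d.items (fun p => p.2) with
  | some p => p.1
  | none => 0

-- ===== PORT A =====
def method_transition (history : List (List Int)) (pos : Int) : Int :=
  let trans := (PySem.List.pyRange 0 ((history.length : Int) - 1) 1).foldl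
    (fun d i => d.modify (PySem.List.pyGetD (PySem.List.pyGetD history i []) pos 0)
      PySem.Dict.empty
      (fun c => c.modify (PySem.List.pyGetD (PySem.List.pyGetD history (i + 1) []) pos 0) 0 (· + 1)))
    PySem.Dict.empty
  let last_val := PySem.List.pyGetD (PySem.List.pyGetD history (-1) []) pos 0
  if trans.contains last_val && (trans.getD last_val PySem.Dict.empty).size != 0 then
    mostCommon1 (trans.getD last_val PySem.Dict.empty)
  else last_val

def method_conditional (history : List (List Int)) (pos : Int) : Int :=
  if pos == 0 then method_transition history pos
  else
    let trans := history.foldl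
      (fun d h => d.modify (PySem.List.pyGetD h (pos - 1) 0) PySem.Dict.empty
        (fun c => c.modify (PySem.List.pyGetD h pos 0) 0 (· + 1)))
      PySem.Dict.empty
    let last_prev := PySem.List.pyGetD (PySem.List.pyGetD history (-1) []) (pos - 1) 0
    if trans.contains last_prev && (trans.getD last_prev PySem.Dict.empty).size != 0 then
      mostCommon1 (trans.getD last_prev PySem.Dict.empty)
    else PySem.List.pyGetD (PySem.List.pyGetD history (-1) []) pos 0

-- ===== PORT B =====
def method_conditional_alt (history : List (List Int)) (pos : Int) : Int :=
  let vals : List Int :=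
    if pos == 0 then
      let key := PySem.List.pyGetD (PySem.List.pyGetD history (-1) []) 0 0
      ((PySem.List.pyRange 0 ((history.length : Int) - 1) 1).filter
        (fun i => PySem.List.pyGetD (PySem.List.pyGetD history i []) 0 0 == key)).map
        (fun i => PySem.List.pyGetD (PySem.List.pyGetD history (i + 1) []) 0 0)
    else
      let key := PySem.List.pyGetD (PySem.List.pyGetD history (-1) []) (pos - 1) 0
      (history.filter (fun h => PySem.List.pyGetD h (pos - 1) 0 == key)).map
        (fun h => PySem.List.pyGetD h pos 0)
  (vals.foldl
    (fun (s : Int × Int) v =>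
      if (vals.count v : Int) > s.2 then (v, (vals.count v : Int)) else s)
    (PySem.List.pyGetD (PySem.List.pyGetD history (-1) []) pos 0, 0)).1

-- ===== PRECONDITION & SPEC =====
-- Pre_ excludes exactly the inputs where A raises IndexError: empty history, or a row
-- where h[pos] (and, for pos ≠ 0, h[pos-1]) is out of range.
def Pre_method_conditional (history : List (List Int)) (pos : Int) : Prop :=
  history ≠ [] ∧ ∀ h ∈ history,
    PySem.Raise.InRange h.length pos ∧ (pos = 0 ∨ PySem.Raise.InRange h.length (pos - 1))
instance (history : List (List Int)) (pos : Int) : Decidable (Pre_method_conditional history pos) := by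
  unfold Pre_method_conditional; infer_instance

def pvWitness_method_conditional : List (List Int) × Int := ([[1, 2], [1, 3], [1, 3]], 1)

def Spec_method_conditional (history : List (List Int)) (pos : Int) (out : Int) : Prop := out = method_conditional_alt history pos
instance (history : List (List Int)) (pos : Int) (out : Int) : Decidable (Spec_method_conditional history pos out) := by unfold Spec_method_conditional; infer_instance

-- ===== CLAIM (what is proved, stated in full; the proofs are below) =====
def Claim_equal_method_conditional : Prop := ∀ (history : List (List Int)) (pos : Int), Dom_method_conditional history pos → Pre_method_conditional history pos → Spec_method_conditional history pos (method_conditional history pos)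

-- ===== LEMMAS AND PROOFS =====

-- B's argmax-scan step, with the count function abstracted.
def fc (c : Int → Int) (s : Int × Int) (v : Int) : Int × Int :=
  if c v > s.2 then (v, c v) else s

lemma fc_snd_le (c : Int → Int) (s : Int × Int) (v : Int) : s.2 ≤ (fc c s v).2 := by
  unfold fc; split_ifs with h <;> omega

-- The per-key content of A's nested modify-loop is the counter-fold of the filtered values.
lemma getD_nested {α : Type} (l : List α) (key val : α → Int)
    (d : PySem.Dict Int (PySem.Dict Int Int)) (k : Int) :
    (l.foldl (fun d h => d.modify (key h) PySem.Dict.empty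
        (fun c => c.modify (val h) 0 (· + 1))) d).getD k PySem.Dict.empty
      = ((l.filter (fun h => key h == k)).map val).foldl
          (fun c x => c.modify x 0 (· + 1)) (d.getD k PySem.Dict.empty) := by
  induction l generalizing d with
  | nil => rfl
  | cons h t ih =>
    simp only [List.foldl_cons, List.filter_cons]
    by_cases hk : key h = k
    · subst hk
      simp only [BEq.rfl, if_true, List.map_cons, List.foldl_cons, ih,
        PySem.Dict.getD_modify_self]
    · have hb : (key h == k) = false := by simp [hk]
      simp [hb, ih, PySem.Dict.getD_modify_of_ne _ _ _ (Ne.symm hk)]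

lemma counter_size_ne_zero (xs : List Int) :
    (((PySem.Dict.counter xs).size != 0) = true) ↔ xs ≠ [] := by
  constructor
  · rintro h rfl
    simp [PySem.Dict.counter, PySem.Dict.size, PySem.Dict.empty] at h
  · intro hne
    obtain ⟨a, t, rfl⟩ := List.exists_cons_of_ne_nil hne
    have ha : a ∈ PySem.Set.ofList (a :: t) := (PySem.Set.mem_ofList _ _).mpr (by simp)
    simp only [bne_iff_ne, ne_eq, PySem.Dict.size, PySem.Dict.items_counter, List.length_map]
    intro h0
    rw [List.length_eq_zero_iff] at h0
    simp [h0] at ha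

-- A's conditional-frequency branch, rewritten over the filtered value list.
lemma branch_eq {α : Type} (l : List α) (key val : α → Int) (lv fb : Int) :
    (let trans := l.foldl (fun d h => d.modify (key h) PySem.Dict.empty
        (fun c => c.modify (val h) 0 (· + 1))) PySem.Dict.empty
     if trans.contains lv && (trans.getD lv PySem.Dict.empty).size != 0 then
       mostCommon1 (trans.getD lv PySem.Dict.empty)
     else fb)
    = (let counts := PySem.Dict.counter ((l.filter (fun h => key h == lv)).map val)
       if counts.size != 0 then mostCommon1 counts else fb) := by
  dsimp only
  set tr : PySem.Dict Int (PySem.Dict Int Int) := l.foldl (fun d h => d.modify (key h) PySem.Dict.empty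
      (fun c => c.modify (val h) 0 (· + 1))) PySem.Dict.empty with htr
  have hg : tr.getD lv PySem.Dict.empty
      = PySem.Dict.counter ((l.filter (fun h => key h == lv)).map val) := by
    rw [htr, getD_nested l key val PySem.Dict.empty lv]; rfl
  by_cases hf : (l.filter (fun h => key h == lv)) = []
  · have hsz : ((PySem.Dict.counter ((l.filter (fun h => key h == lv)).map val)).size != 0)
        = false := by
      simp [hf, PySem.Dict.counter, PySem.Dict.size, PySem.Dict.empty]
    simp only [hg, hsz, Bool.and_false, Bool.false_eq_true, if_false]
  · have hsz : ((PySem.Dict.counter ((l.filter (fun h => key h == lv)).map val)).size != 0)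
        = true :=
      (counter_size_ne_zero _).mpr (by simpa using hf)
    have hc : tr.contains lv = true := by
      by_contra hcf
      have h0 : tr.getD lv PySem.Dict.empty = PySem.Dict.empty :=
        PySem.Dict.getD_of_not_contains _ _ (by simpa using hcf)
      rw [hg] at h0
      rw [h0] at hsz
      simp [PySem.Dict.size, PySem.Dict.empty] at hsz
    simp only [hg, hsz, hc, Bool.and_true, if_true]

-- Scanning a list with the strict-> argmax step equals scanning its first-occurrence
-- dedup (duplicates never fire, since the running best count already dominates them).
lemma dedup_scan (c : Int → Int) : ∀ (l seen : List Int) (s : Int × Int),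
    (∀ v ∈ seen, c v ≤ s.2) →
    ∃ D : List Int, List.foldl PySem.Set.add seen l = seen ++ D ∧
      l.foldl (fc c) s = D.foldl (fc c) s := by
  intro l
  induction l with
  | nil => exact fun seen s _ => ⟨[], by simp, rfl⟩
  | cons v t ih =>
    intro seen s hinv
    by_cases hv : v ∈ seen
    · have hadd : PySem.Set.add seen v = seen := by
        simp [PySem.Set.add, hv]
      have hstep : fc c s v = s := by
        unfold fc
        have := hinv v hv
        split_ifs with h
        · omega
        · rfl
      obtain ⟨D, h1, h2⟩ := ih seen s hinv
      exact ⟨D, by simpa [hadd] using h1, by simpa [hstep] using h2⟩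
    · have hadd : PySem.Set.add seen v = seen ++ [v] := by
        simp [PySem.Set.add, hv]
      have hinv' : ∀ w ∈ seen ++ [v], c w ≤ (fc c s v).2 := by
        intro w hw
        rcases List.mem_append.mp hw with hw | hw
        · exact le_trans (hinv w hw) (fc_snd_le c s v)
        · have : w = v := by simpa using hw
          subst this
          unfold fc
          split_ifs with h <;> omega
      obtain ⟨D, h1, h2⟩ := ih (seen ++ [v]) (fc c s v) hinv'
      refine ⟨v :: D, ?_, ?_⟩
      · simpa [hadd, List.append_assoc] using h1
      · simpa using h2
  
-- Folding from a some-accumulator never returns to none.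
lemma foldl_option_some {a b : Type} (g : Option b → a → Option b) (f : b → a → b)
    (hg : ∀ (m : b) (x : a), g (some m) x = some (f m x)) :
    ∀ (l : List a) (m : b), l.foldl g (some m) = some (l.foldl f m) := by
  intro l
  induction l with
  | nil => intro m; rfl
  | cons x t ih => intro m; rw [List.foldl_cons, hg, List.foldl_cons]; exact ih (f m x)

-- Over a list of positive counts, the argmax scan from (fb, 0) is max? (first extremal).
lemma scan_distinct (c : Int → Int) (ds : List Int) (fb : Int)
    (hpos : ∀ v, v ∈ ds → 0 < c v) :
    (ds.foldl (fc c) (fb, 0)).1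
    = match PySem.List.max? (ds.map (fun k => ((k, c k) : Int × Int))) (fun p => p.2) with
      | some m => m.1
      | none => fb := by
  cases ds with
  | nil => rfl
  | cons k ks =>
    have hk : fc c (fb, 0) k = (k, c k) := by
      unfold fc
      have := hpos k (by simp)
      split_ifs with h
      . rfl
      . omega
    have h1 : PySem.List.max? ((k :: ks).map (fun k => ((k, c k) : Int × Int)))
        (fun p => p.2)
        = some ((ks.map (fun k => ((k, c k) : Int × Int))).foldl
            (fun (m x : Int × Int) => if m.2 < x.2 then x else m) (k, c k)) := by
      unfold PySem.List.max?
      simp only [List.map_cons, List.foldl_cons]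
      refine foldl_option_some _ (fun (m x : Int × Int) => if m.2 < x.2 then x else m) ?_ _ _
      intro m x
      dsimp only
      split <;> rfl
    rw [h1]
    rw [List.foldl_map]
    rw [PySem.List.foldl_congr_mem ks (fun m k => if m.2 < c k then (k, c k) else m) (fc c)
      (k, c k) (fun m k _ => by unfold fc; rfl)]
    simp only [List.foldl_cons, hk]

-- B's full scan equals A's reduced branch over the same value list.
lemma scan_eq (vals : List Int) (fb : Int) :
    (vals.foldl
      (fun (s : Int × Int) v =>
        if (vals.count v : Int) > s.2 then (v, (vals.count v : Int)) else s)
      (fb, 0)).1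
    = if (PySem.Dict.counter vals).size != 0 then mostCommon1 (PySem.Dict.counter vals)
      else fb := by
  have hfold : vals.foldl
      (fun (s : Int × Int) v =>
        if (vals.count v : Int) > s.2 then (v, (vals.count v : Int)) else s)
      (fb, 0) = vals.foldl (fc (fun v => (vals.count v : Int))) (fb, 0) := rfl
  rw [hfold]
  by_cases hne : vals = []
  · subst hne
    simp [PySem.Dict.counter, PySem.Dict.size, PySem.Dict.empty]
  · have hsz := (counter_size_ne_zero vals).mpr hne
    rw [hsz, if_pos rfl]
    obtain ⟨D, h1, h2⟩ :=
      dedup_scan (fun v => (vals.count v : Int)) vals [] (fb, 0) (by simp)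
    have hD : PySem.Set.ofList vals = D := by
      simpa [PySem.Set.ofList, PySem.Set.empty] using h1
    rw [h2, scan_distinct (fun v => (vals.count v : Int)) D fb
      (fun v hv => by
        have hv' : v ∈ vals := (PySem.Set.mem_ofList vals v).mp (hD ▸ hv)
        have := List.count_pos_iff.mpr hv'
        dsimp only
        exact_mod_cast this)]
    unfold mostCommon1
    rw [PySem.Dict.items_counter, hD]
    have hDne : D ≠ [] := by
      intro h0
      obtain ⟨a, t, rfl⟩ := List.exists_cons_of_ne_nil hne
      have ha : a ∈ PySem.Set.ofList (a :: t) := (PySem.Set.mem_ofList _ _).mpr (by simp)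
      rw [hD, h0] at ha
      simp at ha
    cases hmax : PySem.List.max? (D.map (fun k => ((k, (vals.count k : Int)) : Int × Int)))
        (fun p => p.2) with
    | none =>
      have := (PySem.List.max?_eq_none_iff _ _).mp hmax
      simp [List.map_eq_nil_iff] at this
      exact absurd this hDne
    | some p => rfl

-- ===== VERDICT (by name: the statement is the Claim_ definition above) =====
theorem method_conditional_spec : Claim_equal_method_conditional := by
  intro history pos _ _
  unfold Spec_method_conditional method_conditional method_conditional_alt method_transition
  by_cases hp : pos = 0
  · subst hp
    simp only [BEq.rfl, if_true]
    rw [branch_eq (PySem.List.pyRange 0 ((history.length : Int) - 1) 1)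
      (fun i => PySem.List.pyGetD (PySem.List.pyGetD history i []) 0 0)
      (fun i => PySem.List.pyGetD (PySem.List.pyGetD history (i + 1) []) 0 0)
      (PySem.List.pyGetD (PySem.List.pyGetD history (-1) []) 0 0)
      (PySem.List.pyGetD (PySem.List.pyGetD history (-1) []) 0 0)]
    exact (scan_eq _ _).symm
  · have hb : (pos == 0) = false := by simp [hp]
    simp only [hb, Bool.false_eq_true, if_false]
    rw [branch_eq history (fun h => PySem.List.pyGetD h (pos - 1) 0)
      (fun h => PySem.List.pyGetD h pos 0)
      (PySem.List.pyGetD (PySem.List.pyGetD history (-1) []) (pos - 1) 0)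
      (PySem.List.pyGetD (PySem.List.pyGetD history (-1) []) pos 0)]
    exact (scan_eq _ _).symm
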